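-- pv_equiv track=rewrite | github.com/GustavoDanielL/Nova-pasta | utils/validators.py | validate_decimal
-- ===== SOURCE A (Python) =====
-- def validate_decimal(new_value: str) -> bool:
--     """Allow digits, one dot or comma, optional leading digits."""
--     if new_value == "":
--         return True
--     # Replace comma with dot for checking
--     nv = new_value.replace(',', '.')
--     # Allow only one dot
--     if nv.count('.') > 1:
--         return False
--     # After replacing, check all chars are digits or dot
--     for ch in nv:
--         if not (ch.isdigit() or ch == '.'):
--             return False
--     return True
-- ===== SOURCE B (Python) =====
-- def validate_decimal(new_value: str) -> bool:
--     s = new_value.replace(',', '.')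
--     parts = s.split('.')
--     return len(parts) <= 2 and all(p == '' or p.isdigit() for p in parts)
-- ===== Notes on version B (the rewrite author's own statement) =====
-- stated objective: simpler
-- what changed: Replaces the explicit per-character loop plus separator count with a split on the separator and a per-segment digit check (each segment may be empty).
import Mathlib
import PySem

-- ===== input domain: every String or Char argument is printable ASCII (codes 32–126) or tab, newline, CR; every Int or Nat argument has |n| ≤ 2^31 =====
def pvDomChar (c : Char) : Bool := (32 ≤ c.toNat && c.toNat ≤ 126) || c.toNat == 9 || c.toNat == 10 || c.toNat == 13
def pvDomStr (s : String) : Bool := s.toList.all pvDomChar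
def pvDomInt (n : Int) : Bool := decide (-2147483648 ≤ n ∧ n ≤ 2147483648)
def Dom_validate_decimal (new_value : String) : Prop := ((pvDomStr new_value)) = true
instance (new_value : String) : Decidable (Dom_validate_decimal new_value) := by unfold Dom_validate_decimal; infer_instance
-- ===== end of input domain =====

-- B replaces A's explicit character loop and separator count with split-into-segments
-- and a per-segment digit check (objective: simpler); same return value everywhere.

-- ===== PORT A =====
def validate_decimal (new_value : String) : Bool :=
  if new_value == "" then true
  else
    let nv := PySem.Str.replace new_value "," "."
    if PySem.Str.count nv "." > 1 then false
    else nv.toList.all (fun ch => PySem.Chars.isdigit ch || ch == '.')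

-- ===== PORT B =====
def validate_decimal_alt (new_value : String) : Bool :=
  let s := PySem.Str.replace new_value "," "."
  let parts := PySem.Chars.splitOn s.toList ['.']
  decide (parts.length ≤ 2) && parts.all (fun p => p == ([] : List Char) || PySem.Chars.strIsdigit p)

-- ===== PRECONDITION & SPEC =====
def Spec_validate_decimal (new_value : String) (out : Bool) : Prop := out = validate_decimal_alt new_value
instance (new_value : String) (out : Bool) : Decidable (Spec_validate_decimal new_value out) := by unfold Spec_validate_decimal; infer_instance

-- ===== CLAIM (what is proved, stated in full; the proofs are below) =====
def Claim_equal_validate_decimal : Prop := ∀ (new_value : String), Dom_validate_decimal new_value → Spec_validate_decimal new_value (validate_decimal new_value)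

-- ===== LEMMAS AND PROOFS =====

-- the comma→dot substitution, character by character
def pvMap (c : Char) : Char := if c = ',' then '.' else c

-- structural single-char split on '.'
def pvSpl : List Char → List (List Char)
  | [] => [[]]
  | c :: t => if c = '.' then [] :: pvSpl t else (pvSpl t).modifyHead (c :: ·)

theorem pvSpl_ne_nil (l : List Char) : pvSpl l ≠ [] := by
  cases l with
  | nil => simp [pvSpl]
  | cons c t =>
    simp only [pvSpl]
    split
    · simp
    · cases h : pvSpl t with
      | nil => exact absurd h (pvSpl_ne_nil t)
      | cons a b => simp

theorem pv_replace_go (l acc : List Char) (fuel : Nat) (h : l.length ≤ fuel) :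
    PySem.Chars.replace.go [','] ['.'] fuel l acc = acc.reverse ++ l.map pvMap := by
  induction l generalizing acc fuel with
  | nil => cases fuel <;> simp [PySem.Chars.replace.go]
  | cons c t ih =>
    cases fuel with
    | zero => simp at h
    | succ f =>
      simp only [PySem.Chars.replace.go]
      by_cases hc : c = ','
      · subst hc
        rw [if_pos (by simp [List.isPrefixOf])]
        rw [show List.drop [','].length (',' :: t) = t from rfl]
        rw [ih _ f (by simpa using h)]
        simp [pvMap]
      · rw [if_neg (by simp only [List.isPrefixOf,
          Bool.and_true, beq_iff_eq]; exact fun h => hc h.symm)]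
        rw [ih _ f (by simpa using h)]
        simp [pvMap, hc]

theorem pv_replace (cs : List Char) :
    PySem.Chars.replace cs [','] ['.'] = cs.map pvMap := by
  unfold PySem.Chars.replace
  rw [if_neg (by simp)]
  rw [pv_replace_go cs [] cs.length le_rfl]
  simp

theorem pv_count_go (l : List Char) (acc fuel : Nat) (h : l.length ≤ fuel) :
    PySem.Chars.count.go ['.'] fuel l acc = acc + l.count '.' := by
  induction l generalizing acc fuel with
  | nil => cases fuel <;> simp [PySem.Chars.count.go]
  | cons c t ih =>
    cases fuel with
    | zero => simp at h
    | succ f =>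
      simp only [PySem.Chars.count.go]
      by_cases hc : c = '.'
      · subst hc
        rw [if_pos (by simp [List.isPrefixOf])]
        rw [show List.drop ['.'].length ('.' :: t) = t from rfl]
        rw [ih _ f (by simpa using h)]
        simp
        omega
      · rw [if_neg (by simp only [List.isPrefixOf,
          Bool.and_true, beq_iff_eq]; exact fun h => hc h.symm)]
        rw [ih _ f (by simpa using h)]
        simp [hc]

theorem pv_count (cs : List Char) :
    PySem.Chars.count cs ['.'] = cs.count '.' := by
  unfold PySem.Chars.count
  rw [if_neg (by simp)]
  simpa using pv_count_go cs 0 cs.length le_rfl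

theorem pv_splitOn_go (l cur : List Char) (acc : List (List Char)) (fuel : Nat)
    (h : l.length ≤ fuel) :
    PySem.Chars.splitOn.go ['.'] fuel l cur acc
      = acc.reverse ++ (pvSpl l).modifyHead (cur.reverse ++ ·) := by
  induction l generalizing cur acc fuel with
  | nil => cases fuel <;> simp [PySem.Chars.splitOn.go, pvSpl]
  | cons c t ih =>
    cases fuel with
    | zero => simp at h
    | succ f =>
      simp only [PySem.Chars.splitOn.go]
      by_cases hc : c = '.'
      · subst hc
        rw [if_pos (by simp [List.isPrefixOf])]
        rw [show List.drop ['.'].length ('.' :: t) = t from rfl]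
        rw [ih _ _ f (by simpa using h)]
        cases hs : pvSpl t with
        | nil => exact absurd hs (pvSpl_ne_nil t)
        | cons a b => simp [pvSpl, hs]
      · rw [if_neg (by simp only [List.isPrefixOf,
          Bool.and_true, beq_iff_eq]; exact fun h => hc h.symm)]
        rw [ih _ _ f (by simpa using h)]
        cases hs : pvSpl t with
        | nil => exact absurd hs (pvSpl_ne_nil t)
        | cons a b => simp [pvSpl, hc, hs]

theorem pv_splitOn (cs : List Char) :
    PySem.Chars.splitOn cs ['.'] = pvSpl cs := by
  unfold PySem.Chars.splitOn
  rw [pv_splitOn_go cs [] [] (cs.length + 1) (by omega)]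
  cases hs : pvSpl cs with
  | nil => exact absurd hs (pvSpl_ne_nil cs)
  | cons a b => simp

theorem pvSpl_length (l : List Char) : (pvSpl l).length = l.count '.' + 1 := by
  induction l with
  | nil => simp [pvSpl]
  | cons c t ih =>
    by_cases hc : c = '.'
    · subst hc; simp [pvSpl, ih]
    · simp [pvSpl, hc, ih]

theorem pvSpl_all (l : List Char) :
    (pvSpl l).all (fun p => p.all PySem.Chars.isdigit)
      = l.all (fun c => PySem.Chars.isdigit c || c == '.') := by
  induction l with
  | nil => simp [pvSpl]
  | cons c t ih =>
    by_cases hc : c = '.'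
    · subst hc; simp [pvSpl, ih]
    · cases hs : pvSpl t with
      | nil => exact absurd hs (pvSpl_ne_nil t)
      | cons a b =>
        rw [hs] at ih
        simp only [pvSpl, if_neg hc, hs, List.modifyHead, List.all_cons] at *
        simp only [Bool.beq_eq_decide_eq] at *
        by_cases hd : PySem.Chars.isdigit c
        · simp [hd, ih]
        · simp [hd, hc]

theorem pv_part_pred (p : List Char) :
    (p == ([] : List Char) || PySem.Chars.strIsdigit p) = p.all PySem.Chars.isdigit := by
  cases p <;> simp [PySem.Chars.strIsdigit]

theorem pv_all_pred (L : List (List Char)) :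
    L.all (fun p => p == ([] : List Char) || PySem.Chars.strIsdigit p)
      = L.all (fun p => p.all PySem.Chars.isdigit) := by
  induction L with
  | nil => rfl
  | cons a t _ => simp only [List.all_cons, pv_part_pred]

-- ===== VERDICT (by name: the statement is the Claim_ definition above) =====
theorem validate_decimal_spec : Claim_equal_validate_decimal := by
  intro s _
  unfold Spec_validate_decimal
  have hrep : (PySem.Str.replace s "," ".").toList = s.toList.map pvMap := by
    rw [PySem.Str.toList_replace]
    simpa using pv_replace s.toList
  simp only [validate_decimal, validate_decimal_alt, PySem.Str.count_eq, hrep,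
    show ".".toList = ['.'] from rfl, pv_count, pv_splitOn, pv_all_pred, pvSpl_all,
    pvSpl_length]
  by_cases h0 : s = ""
  · subst h0; decide
  · rw [if_neg (by simpa using h0)]
    by_cases hc : (s.toList.map pvMap).count '.' > 1
    · rw [if_pos hc]
      have : ¬ ((s.toList.map pvMap).count '.' + 1 ≤ 2) := by omega
      simp [this]
    · rw [if_neg hc]
      have : (s.toList.map pvMap).count '.' + 1 ≤ 2 := by omega
      simp [this]
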